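-- pv_equiv track=rewrite | github.com/srijan-goel19/csgoutside | model/webapp.py | get_color_range
-- ===== SOURCE A (Python) =====
-- def get_color_range(img):
--     reds = [i[2] for i in img]
--     greens = [i[1] for i in img]
--     blues = [i[0] for i in img]
--
--     rmin, gmin, bmin = int(min(reds)), int(min(greens)), int(min(blues))
--     rmax, gmax, bmax = int(max(reds)), int(max(greens)), int(max(blues))
--
--     lower = [bmin, gmin, rmin]
--     upper = [bmax, gmax, rmax]
--
--     return lower, upper
-- ===== SOURCE B (Python) =====
-- def get_color_range(img):
--     (bmin, gmin, rmin) = img[0]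
--     bmax, gmax, rmax = bmin, gmin, rmin
--     for b, g, r in img[1:]:
--         if b < bmin: bmin = b
--         if b > bmax: bmax = b
--         if g < gmin: gmin = g
--         if g > gmax: gmax = g
--         if r < rmin: rmin = r
--         if r > rmax: rmax = r
--     return [int(bmin), int(gmin), int(rmin)], [int(bmax), int(gmax), int(rmax)]
-- ===== Notes on version B (the rewrite author's own statement) =====
-- stated objective: simpler
-- what changed: B replaces the three list comprehensions and six separate min/max scans by a single pass that maintains six running extrema.
import Mathlib
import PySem

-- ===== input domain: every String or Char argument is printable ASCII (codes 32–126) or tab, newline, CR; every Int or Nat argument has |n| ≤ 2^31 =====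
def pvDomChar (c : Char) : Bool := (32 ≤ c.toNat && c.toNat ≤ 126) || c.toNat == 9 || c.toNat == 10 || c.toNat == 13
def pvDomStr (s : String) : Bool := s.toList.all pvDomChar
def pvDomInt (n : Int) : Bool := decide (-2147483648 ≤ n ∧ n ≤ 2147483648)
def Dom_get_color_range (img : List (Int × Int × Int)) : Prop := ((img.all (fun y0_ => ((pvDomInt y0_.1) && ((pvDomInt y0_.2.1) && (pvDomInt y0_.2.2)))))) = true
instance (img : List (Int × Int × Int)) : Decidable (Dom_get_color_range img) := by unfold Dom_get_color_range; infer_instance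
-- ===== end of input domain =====

-- B replaces A's three list comprehensions and six separate min/max scans by one pass over the
-- pixels maintaining six running extrema (objective: simpler, single traversal).


-- ===== PORT A =====
-- literal port of A: build the three channel lists, then min/max each (Pre_ excludes [],
-- where Python's min([]) raises ValueError; the getD 0 is only reached there)
def get_color_range (img : List (Int × Int × Int)) : List Int × List Int :=
  let reds := img.map (fun i => i.2.2)
  let greens := img.map (fun i => i.2.1)
  let blues := img.map (fun i => i.1)
  let rmin := (PySem.List.min? reds (fun x => x)).getD 0
  let gmin := (PySem.List.min? greens (fun x => x)).getD 0
  let bmin := (PySem.List.min? blues (fun x => x)).getD 0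
  let rmax := (PySem.List.max? reds (fun x => x)).getD 0
  let gmax := (PySem.List.max? greens (fun x => x)).getD 0
  let bmax := (PySem.List.max? blues (fun x => x)).getD 0
  ([bmin, gmin, rmin], [bmax, gmax, rmax])

-- ===== PORT B =====
-- B's single-pass loop over the tail, six accumulators
def gcrLoop : List (Int × Int × Int) → Int → Int → Int → Int → Int → Int → List Int × List Int
  | [], bmin, bmax, gmin, gmax, rmin, rmax => ([bmin, gmin, rmin], [bmax, gmax, rmax])
  | (b, g, r) :: t, bmin, bmax, gmin, gmax, rmin, rmax =>
      gcrLoop t (if b < bmin then b else bmin) (if b > bmax then b else bmax)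
                (if g < gmin then g else gmin) (if g > gmax then g else gmax)
                (if r < rmin then r else rmin) (if r > rmax then r else rmax)

def get_color_range_alt (img : List (Int × Int × Int)) : List Int × List Int :=
  match img with
  | [] => ([], [])   -- B raises IndexError on []; outside Pre_
  | (b, g, r) :: t => gcrLoop t b b g g r r

-- ===== PRECONDITION & SPEC =====
-- Pre_ excludes exactly the empty list, on which A raises ValueError (min of empty sequence).
def Pre_get_color_range (img : List (Int × Int × Int)) : Prop := img ≠ []
instance (img : List (Int × Int × Int)) : Decidable (Pre_get_color_range img) := by unfold Pre_get_color_range; infer_instance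
def pvWitness_get_color_range : (List (Int × Int × Int)) := [(1, 2, 3), (0, 5, 2)]
def Spec_get_color_range (img : List (Int × Int × Int)) (out : List Int × List Int) : Prop := out = get_color_range_alt img
instance (img : List (Int × Int × Int)) (out : List Int × List Int) : Decidable (Spec_get_color_range img out) := by unfold Spec_get_color_range; infer_instance

-- ===== CLAIM (what is proved, stated in full; the proofs are below) =====
def Claim_equal_get_color_range : Prop := ∀ (img : List (Int × Int × Int)), Dom_get_color_range img → Pre_get_color_range img → Spec_get_color_range img (get_color_range img)

-- ===== LEMMAS AND PROOFS =====

theorem if_lt_eq_min (a b : Int) : (if b < a then b else a) = min a b := by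
  simp [min_def]; omega

theorem if_gt_eq_max (a b : Int) : (if b > a then b else a) = max a b := by
  simp [max_def]; omega

theorem gcrLoop_folds (t : List (Int × Int × Int)) : ∀ (bm bM gm gM rm rM : Int),
    gcrLoop t bm bM gm gM rm rM =
      ([(t.map (fun i => i.1)).foldl min bm, (t.map (fun i => i.2.1)).foldl min gm,
        (t.map (fun i => i.2.2)).foldl min rm],
       [(t.map (fun i => i.1)).foldl max bM, (t.map (fun i => i.2.1)).foldl max gM,
        (t.map (fun i => i.2.2)).foldl max rM]) := by
  induction t with
  | nil => intro bm bM gm gM rm rM; simp [gcrLoop]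
  | cons h t ih =>
      intro bm bM gm gM rm rM
      obtain ⟨b, g, r⟩ := h
      simp only [gcrLoop, List.map_cons, List.foldl_cons, ih, if_lt_eq_min, if_gt_eq_max]

-- ===== VERDICT (by name: the statement is the Claim_ definition above) =====
theorem get_color_range_spec : Claim_equal_get_color_range := by
  intro img _ hpre
  unfold Spec_get_color_range get_color_range get_color_range_alt
  match img with
  | [] => exact absurd rfl hpre
  | (b, g, r) :: t =>
      simp only [List.map_cons, PySem.List.min?_id_cons, PySem.List.max?_id_cons,
        Option.getD_some, gcrLoop_folds]
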